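-- pv_equiv track=rewrite | github.com/wyk18703232953/myResearch | codeComplex/data copy/filteredData/python/quadratic/python_quadratic_0523.py | core_algorithm
-- ===== SOURCE A (Python) =====
-- def check(m, v, x, y):
--     for i in (-1, 0, 1):
--         for j in (-1, 0, 1):
--             if (i, j) == (0, 0):
--                 continue
--             if not m[x + i][y + j]:
--                 return
--
--     for i in (-1, 0, 1):
--         for j in (-1, 0, 1):
--             if (i, j) != (0, 0):
--                 v[x + i][y + j] = True
--
-- def core_algorithm(mat):
--     n = len(mat)
--     if n == 0:
--         return True
--     m = len(mat[0])
--     v = [[False] * m for _ in range(n)]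
--
--     if n >= 3 and m >= 3:
--         for x in range(1, n - 1):
--             for y in range(1, m - 1):
--                 check(mat, v, x, y)
--
--     flag = True
--     for i in range(n):
--         for j in range(m):
--             if mat[i][j] and (not v[i][j]):
--                 flag = False
--     return flag
-- ===== SOURCE B (Python) =====
-- def core_algorithm(mat):
--     n = len(mat)
--     if n == 0:
--         return True
--     m = len(mat[0])
--
--     def full_block(x, y):
--         return all(mat[x + dx][y + dy]
--                    for dx in (-1, 0, 1) for dy in (-1, 0, 1)
--                    if (dx, dy) != (0, 0))
--
--     # valid[x][y]: (x, y) is an interior center whose eight surrounding cells are all true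
--     valid = [[1 <= x <= n - 2 and 1 <= y <= m - 2 and full_block(x, y)
--               for y in range(m)] for x in range(n)]
--
--     def covered(i, j):
--         # (i, j) is covered iff some ADJACENT cell is a valid center (a center never covers itself)
--         return any(valid[x][y]
--                    for x in range(max(0, i - 1), min(n, i + 2))
--                    for y in range(max(0, j - 1), min(m, j + 2))
--                    if (x, y) != (i, j))
--
--     return all(covered(i, j)
--                for i in range(n) for j in range(m) if mat[i][j])
-- ===== Notes on version B (the rewrite author's own statement) =====
-- stated objective: alternative
-- what changed: A stamps coverage into a mutable grid v from each valid 3x3 center (scatter); B builds a pure valid-center table and derives each cell's coverage by looking up adjacent valid centers (gather/dilation), with no mutated coverage grid.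
import Mathlib
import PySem

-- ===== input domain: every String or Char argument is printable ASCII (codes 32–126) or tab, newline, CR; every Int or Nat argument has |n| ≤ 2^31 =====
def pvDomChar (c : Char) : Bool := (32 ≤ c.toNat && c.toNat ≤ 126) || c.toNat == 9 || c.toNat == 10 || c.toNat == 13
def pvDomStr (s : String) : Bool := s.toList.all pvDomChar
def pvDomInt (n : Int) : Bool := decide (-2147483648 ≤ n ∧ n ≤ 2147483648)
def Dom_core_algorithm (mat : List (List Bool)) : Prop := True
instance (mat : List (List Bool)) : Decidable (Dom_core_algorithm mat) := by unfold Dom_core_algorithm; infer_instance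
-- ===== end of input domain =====

-- B replaces A's mutable coverage grid (stamped from each valid 3x3 center) by a pure
-- valid-center table from which each cell's coverage is derived by adjacent lookup (gather vs scatter).

-- ===== PORT A =====
-- mat[x][y]; Pre_ keeps every index actually read in range, so the getD defaults never matter
def pvGetB (v : List (List Bool)) (i j : Nat) : Bool := (v.getD i []).getD j false

-- the eight (i,j) offsets of check's double loop over (-1,0,1) skipping (0,0);
-- offset (di,dj) is rendered as (a,b) = (di+1, dj+1) so that x+di = (x-1)+a stays in Nat (loops give x ≥ 1)
def pvOffs : List (Nat × Nat) := [(0,0),(0,1),(0,2),(1,0),(1,2),(2,0),(2,1),(2,2)]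

-- check's first loop: early return unless all eight surrounding cells are true
def pvCheckOk (mat : List (List Bool)) (x y : Nat) : Bool :=
  pvOffs.all (fun ab => pvGetB mat (x-1+ab.1) (y-1+ab.2))

-- v[i][j] = True
def pvSet2 (v : List (List Bool)) (i j : Nat) : List (List Bool) :=
  v.modify i (fun r => r.set j true)

-- check's second loop: mark the eight surrounding cells in v
def pvMark (v : List (List Bool)) (x y : Nat) : List (List Bool) :=
  pvOffs.foldl (fun v ab => pvSet2 v (x-1+ab.1) (y-1+ab.2)) v

def pvCheck (mat : List (List Bool)) (v : List (List Bool)) (x y : Nat) : List (List Bool) :=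
  if pvCheckOk mat x y then pvMark v x y else v

def core_algorithm (mat : List (List Bool)) : Bool :=
  let n := mat.length
  if n = 0 then true else
  let m := (mat.headD []).length
  let v0 := List.replicate n (List.replicate m false)
  -- range(1, n-1) = List.range' 1 (n-2), likewise for m
  let v := if 3 ≤ n ∧ 3 ≤ m then
      (List.range' 1 (n-2)).foldl (fun v x =>
        (List.range' 1 (m-2)).foldl (fun v y => pvCheck mat v x y) v) v0
    else v0
  (List.range n).foldl (fun flag i =>
    (List.range m).foldl (fun flag j =>
      if pvGetB mat i j && !(pvGetB v i j) then false else flag) flag) true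

-- ===== PORT B =====
def pvCell (v : List (List Bool)) (i j : Nat) : Bool := (v.getD i []).getD j false

-- full_block's generator order: dx then dy, skipping (0,0); (dx,dy) rendered as (dx+1,dy+1), x+dx = (x-1)+(dx+1)
def pvNbrs : List (Nat × Nat) := [(0,0),(0,1),(0,2),(1,0),(1,2),(2,0),(2,1),(2,2)]

def pvFullBlock (mat : List (List Bool)) (x y : Nat) : Bool :=
  pvNbrs.all (fun ab => pvCell mat (x-1+ab.1) (y-1+ab.2))

-- valid table: interior centers whose eight surrounding cells are all true
def pvValid (mat : List (List Bool)) (n m : Nat) : List (List Bool) :=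
  (List.range n).map (fun x => (List.range m).map (fun y =>
    decide (1 ≤ x ∧ x ≤ n-2 ∧ 1 ≤ y ∧ y ≤ m-2) && pvFullBlock mat x y))

-- covered(i,j): some adjacent cell is a valid center; range(max(0,i-1), min(n,i+2)) = range' (i-1) (min n (i+2) - (i-1))
def pvCovered (valid : List (List Bool)) (n m i j : Nat) : Bool :=
  (List.range' (i-1) (min n (i+2) - (i-1))).any (fun x =>
    (List.range' (j-1) (min m (j+2) - (j-1))).any (fun y =>
      !(decide (x = i ∧ y = j)) && pvCell valid x y))

def core_algorithm_alt (mat : List (List Bool)) : Bool :=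
  let n := mat.length
  if n = 0 then true else
  let m := (mat.headD []).length
  let valid := pvValid mat n m
  (List.range n).all (fun i => (List.range m).all (fun j =>
    !(pvCell mat i j) || pvCovered valid n m i j))

-- ===== PRECONDITION & SPEC =====
-- Pre_ excludes matrices with a row shorter than the first row: there Python A raises IndexError.
def Pre_core_algorithm (mat : List (List Bool)) : Prop :=
  ∀ r ∈ mat, (mat.headD []).length ≤ r.length
instance (mat : List (List Bool)) : Decidable (Pre_core_algorithm mat) := by
  unfold Pre_core_algorithm; infer_instance

def pvWitness_core_algorithm : List (List Bool) :=
  [[true,true,true],[true,false,true],[true,true,true]]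

def Spec_core_algorithm (mat : List (List Bool)) (out : Bool) : Prop := out = core_algorithm_alt mat
instance (mat : List (List Bool)) (out : Bool) : Decidable (Spec_core_algorithm mat out) := by unfold Spec_core_algorithm; infer_instance

-- ===== CLAIM (what is proved, stated in full; the proofs are below) =====
def Claim_equal_core_algorithm : Prop := ∀ (mat : List (List Bool)), Dom_core_algorithm mat → Pre_core_algorithm mat → Spec_core_algorithm mat (core_algorithm mat)

-- ===== LEMMAS AND PROOFS =====

def pvShape (v : List (List Bool)) (n m : Nat) : Prop :=
  v.length = n ∧ ∀ k < n, (v.getD k []).length = m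

theorem pvShape_set2 {v : List (List Bool)} {n m i j : Nat} (h : pvShape v n m) :
    pvShape (pvSet2 v i j) n m := by
  obtain ⟨h1, h2⟩ := h
  refine ⟨by simp [pvSet2, h1], fun k hk => ?_⟩
  have := h2 k hk
  simp only [pvSet2, List.getD_eq_getElem?_getD, List.getElem?_modify] at *
  by_cases hik : i = k <;> simp [hik] at *
  · cases hv : v[k]? <;> simp [hv] at * <;> simpa using this
  · exact this

theorem pvGetB_set2 {v : List (List Bool)} {n m i j : Nat} (h : pvShape v n m)
    (hi : i < n) (hj : j < m) (p q : Nat) :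
    pvGetB (pvSet2 v i j) p q = ((decide (p = i) && decide (q = j)) || pvGetB v p q) := by
  obtain ⟨h1, h2⟩ := h
  have hiv : i < v.length := by omega
  simp only [pvGetB, pvSet2, List.getD_eq_getElem?_getD, List.getElem?_modify]
  by_cases hip : i = p
  · subst hip
    have hrow := h2 i hi
    simp only [List.getD_eq_getElem?_getD] at hrow
    cases hv : v[i]? with
    | none => have := List.getElem?_eq_none_iff.mp hv; omega
    | some r =>
      simp only [Option.getD_some]
      have hr : r.length = m := by simpa [hv] using hrow
      by_cases hjq : j = q
      · subst hjq; simp [hr, hj]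
      · simp [List.getElem?_set_ne hjq, Ne.symm hjq]
  · simp [hip, Ne.symm hip]

theorem pvGetB_setFold {n m : Nat} (os : List (Nat × Nat)) {v : List (List Bool)} {x y : Nat}
    (h : pvShape v n m) (hb : ∀ ab ∈ os, x-1+ab.1 < n ∧ y-1+ab.2 < m) (p q : Nat) :
    pvGetB (os.foldl (fun v ab => pvSet2 v (x-1+ab.1) (y-1+ab.2)) v) p q
      = (os.any (fun ab => decide (p = x-1+ab.1) && decide (q = y-1+ab.2)) || pvGetB v p q) := by
  induction os generalizing v with
  | nil => simp
  | cons ab t ih =>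
    have hab := hb ab (by simp)
    rw [List.foldl_cons, ih (pvShape_set2 h) (fun c hc => hb c (by simp [hc])),
        pvGetB_set2 h hab.1 hab.2]
    simp [Bool.or_assoc, Bool.or_comm]

theorem pvShape_setFold {n m : Nat} (os : List (Nat × Nat)) {v : List (List Bool)} {x y : Nat}
    (h : pvShape v n m) :
    pvShape (os.foldl (fun v ab => pvSet2 v (x-1+ab.1) (y-1+ab.2)) v) n m := by
  induction os generalizing v with
  | nil => exact h
  | cons ab t ih => exact ih (pvShape_set2 h)

def pvNbrB (x y p q : Nat) : Bool :=
  pvOffs.any (fun ab => decide (p = x-1+ab.1) && decide (q = y-1+ab.2))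

theorem pvGetB_check {n m : Nat} {mat v : List (List Bool)} {x y : Nat}
    (h : pvShape v n m) (hx1 : 1 ≤ x) (hx2 : x+1 < n) (hy1 : 1 ≤ y) (hy2 : y+1 < m) (p q : Nat) :
    pvGetB (pvCheck mat v x y) p q
      = ((pvCheckOk mat x y && pvNbrB x y p q) || pvGetB v p q) := by
  unfold pvCheck
  by_cases hok : pvCheckOk mat x y = true
  · rw [if_pos hok, hok]
    unfold pvMark pvNbrB
    rw [pvGetB_setFold pvOffs h ?_ p q]
    · simp
    · intro ab hab
      fin_cases hab <;> simp <;> omega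
  · simp [hok]

theorem pvShape_check {n m : Nat} {mat v : List (List Bool)} {x y : Nat} (h : pvShape v n m) :
    pvShape (pvCheck mat v x y) n m := by
  unfold pvCheck
  split
  · exact pvShape_setFold pvOffs h
  · exact h

theorem pvGetB_centersFold {n m : Nat} {mat : List (List Bool)} (cs : List (Nat × Nat))
    {v : List (List Bool)} (h : pvShape v n m)
    (hc : ∀ c ∈ cs, 1 ≤ c.1 ∧ c.1+1 < n ∧ 1 ≤ c.2 ∧ c.2+1 < m) (p q : Nat) :
    pvGetB (cs.foldl (fun v c => pvCheck mat v c.1 c.2) v) p q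
      = (cs.any (fun c => pvCheckOk mat c.1 c.2 && pvNbrB c.1 c.2 p q) || pvGetB v p q) := by
  induction cs generalizing v with
  | nil => simp
  | cons c t ih =>
    have hcc := hc c (by simp)
    rw [List.foldl_cons, ih (pvShape_check h) (fun d hd => hc d (by simp [hd])),
        pvGetB_check h hcc.1 hcc.2.1 hcc.2.2.1 hcc.2.2.2]
    simp [Bool.or_assoc, Bool.or_comm]

theorem pvFoldl_nested {α β γ : Type} (xs : List α) (ys : List β) (f : γ → α → β → γ) (init : γ) :
    xs.foldl (fun v x => ys.foldl (fun v y => f v x y) v) init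
      = (xs.flatMap (fun x => ys.map (fun y => (x, y)))).foldl (fun v c => f v c.1 c.2) init := by
  induction xs generalizing init with
  | nil => simp
  | cons x t ih => simp [List.foldl_append, List.foldl_map, ih]

theorem pvGetB_v0 (n m p q : Nat) :
    pvGetB (List.replicate n (List.replicate m false)) p q = false := by
  simp only [pvGetB, List.getD_eq_getElem?_getD, List.getElem?_replicate]
  split <;> simp

theorem pvShape_v0 (n m : Nat) : pvShape (List.replicate n (List.replicate m false)) n m := by
  refine ⟨by simp, fun k hk => ?_⟩
  simp [List.getD_eq_getElem?_getD, hk]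

theorem pvCell_valid (mat : List (List Bool)) (n m x y : Nat) :
    pvCell (pvValid mat n m) x y
      = (decide (x < n ∧ y < m ∧ 1 ≤ x ∧ x ≤ n-2 ∧ 1 ≤ y ∧ y ≤ m-2) && pvFullBlock mat x y) := by
  simp only [pvCell, pvValid, List.getD_eq_getElem?_getD, List.getElem?_map]
  by_cases hx : x < n
  · by_cases hy : y < m
    · simp [hx, hy]
    · simp [hx, hy]
  · simp [hx]

theorem pvFullBlock_eq (mat : List (List Bool)) (x y : Nat) :
    pvFullBlock mat x y = pvCheckOk mat x y := rfl

theorem pvNbrB_iff {x y : Nat} (p q : Nat) (hx : 1 ≤ x) (hy : 1 ≤ y) :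
    pvNbrB x y p q = true ↔ (x ≤ p+1 ∧ p ≤ x+1 ∧ y ≤ q+1 ∧ q ≤ y+1 ∧ ¬(p = x ∧ q = y)) := by
  simp only [pvNbrB, pvOffs, List.any_cons, List.any_nil, Bool.or_eq_true, Bool.and_eq_true,
    decide_eq_true_eq, Bool.false_eq_true, or_false]
  omega

theorem pvFoldl_flagBad {α : Type} (l : List α) (bad : α → Bool) (b : Bool) :
    l.foldl (fun fl x => if bad x then false else fl) b = (b && l.all (fun x => !bad x)) := by
  induction l generalizing b with
  | nil => simp
  | cons x t ih =>
    rw [List.foldl_cons, ih]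
    cases hb : bad x <;> simp [hb]

theorem pvFoldl_and {α : Type} (l : List α) (g : α → Bool) (b : Bool) :
    l.foldl (fun fl x => fl && g x) b = (b && l.all g) := by
  induction l generalizing b with
  | nil => simp
  | cons x t ih => rw [List.foldl_cons, ih]; simp [Bool.and_assoc]

-- pointwise: A's final coverage grid agrees with B's derived coverage
theorem pvPointwise (mat : List (List Bool)) (n m i j : Nat) (hn : n = mat.length)
    (hm : m = (mat.headD []).length) (hi : i < n) (hj : j < m) :
    pvGetB (if 3 ≤ n ∧ 3 ≤ m then
        (List.range' 1 (n-2)).foldl (fun v x =>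
          (List.range' 1 (m-2)).foldl (fun v y => pvCheck mat v x y) v)
          (List.replicate n (List.replicate m false))
      else List.replicate n (List.replicate m false)) i j
      = pvCovered (pvValid mat n m) n m i j := by
  by_cases hg : 3 ≤ n ∧ 3 ≤ m
  · rw [if_pos hg, pvFoldl_nested]
    rw [pvGetB_centersFold _ (pvShape_v0 n m) ?_ i j]
    · rw [pvGetB_v0, Bool.or_false]
      rw [Bool.eq_iff_iff]
      simp only [List.any_eq_true, List.mem_flatMap, List.mem_map, List.mem_range'_1,
        Bool.and_eq_true, pvCovered, pvCell_valid, pvFullBlock_eq, Bool.not_eq_true',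
        decide_eq_true_eq, decide_eq_false_iff_not]
      constructor
      · rintro ⟨c, ⟨x, ⟨hx1, hx2⟩, y, ⟨hy1, hy2⟩, rfl⟩, hok, hnbr⟩
        rw [pvNbrB_iff i j (by omega) (by omega)] at hnbr
        refine ⟨x, by omega, y, by omega, ?_, ?_, hok⟩
        · simpa [decide_eq_false_iff_not] using (by tauto : ¬(x = i ∧ y = j))
        · exact (by omega : x < n ∧ y < m ∧ 1 ≤ x ∧ x ≤ n-2 ∧ 1 ≤ y ∧ y ≤ m-2)
      · rintro ⟨x, hx, y, hy, hne, hb, hok⟩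
        have hne' : ¬(x = i ∧ y = j) := by
          simpa [decide_eq_false_iff_not] using hne
        refine ⟨(x, y), ⟨x, by omega, y, by omega, rfl⟩, hok, ?_⟩
        rw [pvNbrB_iff i j (by omega) (by omega)]
        omega
    · intro c hc
      simp only [List.mem_flatMap, List.mem_map, List.mem_range'_1] at hc
      obtain ⟨x, hx, y, hy, rfl⟩ := hc
      omega
  · rw [if_neg hg, pvGetB_v0]
    rw [Bool.eq_iff_iff]
    simp only [Bool.false_eq_true, false_iff, pvCovered, List.any_eq_true, List.mem_range'_1,
      Bool.and_eq_true, pvCell_valid, decide_eq_true_eq, not_exists]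
    rintro x ⟨hx, y, hy, hne, hcond, hok⟩
    omega

-- ===== VERDICT (by name: the statement is the Claim_ definition above) =====
theorem core_algorithm_spec : Claim_equal_core_algorithm := by
  intro mat _ _
  unfold Spec_core_algorithm core_algorithm core_algorithm_alt
  by_cases hn : mat.length = 0
  · simp [hn]
  · simp only [hn, if_false]
    set n := mat.length with hn'
    set m := (mat.headD []).length with hm'
    have hstep : (fun (flag : Bool) i =>
        (List.range m).foldl (fun flag j =>
          if pvGetB mat i j && !(pvGetB (if 3 ≤ n ∧ 3 ≤ m then
              (List.range' 1 (n-2)).foldl (fun v x =>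
                (List.range' 1 (m-2)).foldl (fun v y => pvCheck mat v x y) v)
                (List.replicate n (List.replicate m false))
            else List.replicate n (List.replicate m false)) i j) then false else flag) flag)
        = (fun (flag : Bool) i => flag && (List.range m).all (fun j =>
            !(pvGetB mat i j && !(pvGetB (if 3 ≤ n ∧ 3 ≤ m then
              (List.range' 1 (n-2)).foldl (fun v x =>
                (List.range' 1 (m-2)).foldl (fun v y => pvCheck mat v x y) v)
                (List.replicate n (List.replicate m false))
            else List.replicate n (List.replicate m false)) i j)))) := by
      funext flag i
      exact pvFoldl_flagBad (List.range m) _ flag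
    rw [hstep, pvFoldl_and, Bool.true_and, Bool.eq_iff_iff]
    simp only [List.all_eq_true, List.mem_range, Bool.not_eq_eq_eq_not, Bool.not_and,
      Bool.not_not, Bool.or_eq_true]
    constructor
    · intro h i hi j hj
      have := h i hi j hj
      rcases this with h1 | h2
      · exact Or.inl h1
      · exact Or.inr (by rw [← pvPointwise mat n m i j hn' hm' hi hj]; simpa using h2)
    · intro h i hi j hj
      have := h i hi j hj
      rcases this with h1 | h2
      · exact Or.inl h1
      · exact Or.inr (by rw [pvPointwise mat n m i j hn' hm' hi hj]; simpa using h2)
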